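-- pv_equiv track=rewrite | github.com/chavalasantosh/Threshold_Onset | integration/model/generator.py | symbols_to_text
-- ===== SOURCE A (Python) =====
-- from typing import Dict, List, Optional, Tuple
--
-- def symbols_to_text(symbols: List[int], vocab: Dict[int, str]) -> str:
--     """Decode symbol sequence to text; skip unknown; dedupe consecutive same token."""
--     tokens: List[str] = []
--     prev: Optional[str] = None
--     for sym in symbols:
--         tok = vocab.get(sym)
--         if tok and tok != prev:
--             tokens.append(tok)
--             prev = tok
--     return " ".join(tokens)
-- ===== SOURCE B (Python) =====
-- def symbols_to_text(symbols, vocab):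
--     """Decode symbol sequence to text; skip unknown; dedupe consecutive same token."""
--     toks = [t for t in (vocab.get(s) for s in symbols) if t]
--     return " ".join(t for t, p in zip(toks, [None] + toks) if t != p)
-- ===== Notes on version B (the rewrite author's own statement) =====
-- stated objective: idiomatic
-- what changed: A's single fused loop with mutable prev/tokens state is replaced by a two-pass pipeline: a comprehension that decodes and drops falsy tokens, then a zip of the token list with its own shift by one that keeps tokens differing from their predecessor.
import Mathlib
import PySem

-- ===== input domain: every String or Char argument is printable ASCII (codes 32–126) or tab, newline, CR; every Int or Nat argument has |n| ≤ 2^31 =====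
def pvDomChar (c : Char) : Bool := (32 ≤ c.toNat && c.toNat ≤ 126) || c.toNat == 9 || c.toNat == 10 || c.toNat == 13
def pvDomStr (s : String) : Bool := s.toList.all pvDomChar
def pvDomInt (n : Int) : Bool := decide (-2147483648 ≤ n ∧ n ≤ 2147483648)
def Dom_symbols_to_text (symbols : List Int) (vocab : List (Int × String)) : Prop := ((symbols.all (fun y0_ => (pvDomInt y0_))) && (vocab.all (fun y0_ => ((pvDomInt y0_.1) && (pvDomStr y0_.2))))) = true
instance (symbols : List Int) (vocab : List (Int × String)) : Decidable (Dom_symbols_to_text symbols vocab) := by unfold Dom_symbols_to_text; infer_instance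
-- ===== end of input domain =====

-- B replaces A's fused decode+dedupe loop with mutable prev state by a two-pass pipeline
-- (filter-decode comprehension, then zip-with-shifted-self to drop consecutive duplicates); idiomatic, same cost.

-- vocab.get(sym) on the association list (first match, None if absent); shared by both ports
def pvGet (vocab : List (Int × String)) (k : Int) : Option String :=
  (vocab.find? (fun p => p.1 == k)).map (·.2)

-- ===== PORT A =====
def symbols_to_text (symbols : List Int) (vocab : List (Int × String)) : String :=
  let st := symbols.foldl (fun (st : List String × Option String) sym =>
    match pvGet vocab sym with
    | none => st
    | some tok => if tok ≠ "" ∧ some tok ≠ st.2 then (st.1 ++ [tok], some tok) else st)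
    ([], none)
  PySem.Str.join " " st.1

-- ===== PORT B =====
def symbols_to_text_alt (symbols : List Int) (vocab : List (Int × String)) : String :=
  let toks := symbols.filterMap (fun s => (pvGet vocab s).filter (fun t => t ≠ ""))
  PySem.Str.join " "
    ((toks.zip ((none : Option String) :: toks.map some)).filterMap
      (fun tp => if some tp.1 ≠ tp.2 then some tp.1 else none))

-- ===== PRECONDITION & SPEC =====
def Spec_symbols_to_text (symbols : List Int) (vocab : List (Int × String)) (out : String) : Prop := out = symbols_to_text_alt symbols vocab
instance (symbols : List Int) (vocab : List (Int × String)) (out : String) : Decidable (Spec_symbols_to_text symbols vocab out) := by unfold Spec_symbols_to_text; infer_instance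

-- ===== CLAIM (what is proved, stated in full; the proofs are below) =====
def Claim_equal_symbols_to_text : Prop := ∀ (symbols : List Int) (vocab : List (Int × String)), Dom_symbols_to_text symbols vocab → Spec_symbols_to_text symbols vocab (symbols_to_text symbols vocab)

-- ===== LEMMAS AND PROOFS =====

-- reference dedup-by-previous, used to relate the two ports
def pvDedup (prev : Option String) : List String → List String
  | [] => []
  | x :: xs => if some x = prev then pvDedup prev xs else x :: pvDedup (some x) xs

def pvLast (prev : Option String) : List String → Option String
  | [] => prev
  | x :: xs => pvLast (some x) xs

theorem pvZip_dedup (l : List String) (prev : Option String) :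
    (l.zip (prev :: l.map some)).filterMap
      (fun tp => if some tp.1 ≠ tp.2 then some tp.1 else none) = pvDedup prev l := by
  induction l generalizing prev with
  | nil => simp [pvDedup]
  | cons x xs ih =>
    by_cases h : some x = prev
    · simpa [pvDedup, h] using ih prev
    · simpa [pvDedup, h] using ih (some x)

theorem pvFoldA (vocab : List (Int × String)) (symbols : List Int)
    (acc : List String) (prev : Option String) :
    symbols.foldl (fun (st : List String × Option String) sym =>
      match pvGet vocab sym with
      | none => st
      | some tok => if tok ≠ "" ∧ some tok ≠ st.2 then (st.1 ++ [tok], some tok) else st)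
      (acc, prev)
    = (acc ++ pvDedup prev (symbols.filterMap (fun s => (pvGet vocab s).filter (fun t => t ≠ ""))),
       pvLast prev (symbols.filterMap (fun s => (pvGet vocab s).filter (fun t => t ≠ "")))) := by
  induction symbols generalizing acc prev with
  | nil => simp [pvDedup, pvLast]
  | cons sym rest ih =>
    simp only [List.foldl_cons, List.filterMap_cons]
    cases hget : pvGet vocab sym with
    | none => simp [hget, ih]
    | some tok =>
      simp only [hget]
      by_cases ht : tok = ""
      · simp [ht, Option.filter, ih]
      · by_cases hp : some tok = prev
        · have hcond : ¬ (tok ≠ "" ∧ some tok ≠ ((acc, prev) : List String × Option String).2) := by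
            simp; tauto
          rw [if_neg hcond, ih]
          subst hp
          simp [Option.filter, ht, pvDedup, pvLast]
        · have hcond : (tok ≠ "" ∧ some tok ≠ ((acc, prev) : List String × Option String).2) := ⟨ht, hp⟩
          rw [if_pos hcond, ih]
          simp [Option.filter, ht, pvDedup, pvLast, hp]

-- ===== VERDICT (by name: the statement is the Claim_ definition above) =====
theorem symbols_to_text_spec : Claim_equal_symbols_to_text := by
  intro symbols vocab _
  unfold Spec_symbols_to_text symbols_to_text symbols_to_text_alt
  simp only [pvFoldA, pvZip_dedup, List.nil_append]
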